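-- pv_equiv track=rewrite | github.com/Akuearias/LeetCode | printVertically.py | printVertically
-- ===== SOURCE A (Python) =====
-- from typing import List
--
-- def printVertically(s: str) -> List[str]:
--     words_list = s.split(' ')
--     longest = 0
--     longest_id = 0
--     for i in range(len(words_list)):
--         longest = max(longest, len(words_list[i]))
--     vertical = []
--     for i in range(longest):
--         vertical_word = []
--         for j in range(len(words_list)):
--             if i < len(words_list[j]):
--                 vertical_word.append(words_list[j][i])
--             else:
--                 vertical_word.append(" ")
--         vertical_str = ''.join(vertical_word)
--         vertical_str = vertical_str.rstrip()
--         vertical.append(vertical_str)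
--
--     return vertical
-- ===== SOURCE B (Python) =====
-- from typing import List
--
-- def printVertically(s: str) -> List[str]:
--     cols = s.split(' ')
--     rows = []
--     while any(cols):
--         rows.append(''.join(w[0] if w else ' ' for w in cols).rstrip())
--         cols = [w[1:] for w in cols]
--     return rows
-- ===== Notes on version B (the rewrite author's own statement) =====
-- stated objective: simpler
-- what changed: B peels the words column by column (head of each word, then the tails) in a single while-any loop, instead of A's pre-computed longest length and doubly indexed grid fill with an i<len padding branch.
import Mathlib
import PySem

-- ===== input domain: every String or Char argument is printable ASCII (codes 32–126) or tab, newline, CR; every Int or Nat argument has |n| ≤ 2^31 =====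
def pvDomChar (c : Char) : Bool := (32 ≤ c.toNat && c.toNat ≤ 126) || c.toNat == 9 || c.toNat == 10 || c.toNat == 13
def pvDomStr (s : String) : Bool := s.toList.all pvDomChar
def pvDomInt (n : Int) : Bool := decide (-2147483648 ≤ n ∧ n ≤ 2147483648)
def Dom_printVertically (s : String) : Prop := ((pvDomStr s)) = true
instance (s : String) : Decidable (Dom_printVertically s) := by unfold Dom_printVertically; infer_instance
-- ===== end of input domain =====

-- B peels the words column by column (head of each word, then the tails) in one while-any loop,
-- instead of A's pre-computed longest length and doubly indexed grid fill: simpler decomposition, same cost.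

-- ===== PORT A =====
def printVertically (s : String) : List String :=
  let wordsList := (PySem.Str.split? s " ").getD []  -- s.split(' '); the sep " " is nonempty, so split? is always some
  let longest : Int := (PySem.List.pyRange 0 (PySem.List.len wordsList)).foldl
      (fun acc i => max acc (PySem.Str.len (PySem.List.pyGetD wordsList i ""))) 0
  (PySem.List.pyRange 0 longest).foldl
    (fun vertical i =>
      let verticalWord : List Char := (PySem.List.pyRange 0 (PySem.List.len wordsList)).foldl
        (fun acc j =>
          acc ++ [if i < PySem.Str.len (PySem.List.pyGetD wordsList j "") then
                    (PySem.Str.pyGet? (PySem.List.pyGetD wordsList j "") i).getD ' '  -- guarded by i < len, so pyGet? is some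
                  else ' '])
        []
      vertical ++ [PySem.Str.rstrip (String.ofList verticalWord)])  -- ''.join of one-char strings is String.ofList
    []

-- ===== PORT B =====
-- the longest remaining column, B's loop bound
def pvMaxLen : List (List Char) → Nat
  | [] => 0
  | w :: t => max w.length (pvMaxLen t)

-- the while-loop, with the shrinking measure pvMaxLen as structural fuel (the fuel only makes the
-- same computation total: with fuel ≥ pvMaxLen cols the guard, not the fuel, ends the loop)
def pvAltGo : Nat → List (List Char) → List String
  | 0, _ => []
  | fuel + 1, cols =>
    if cols.any (fun w => !w.isEmpty) then
      PySem.Str.rstrip (String.ofList (cols.map (fun w => w.headD ' ')))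
        :: pvAltGo fuel (cols.map (List.drop 1))
    else []

def pvAltLoop (cols : List (List Char)) : List String := pvAltGo (pvMaxLen cols) cols

def printVertically_alt (s : String) : List String :=
  pvAltLoop (((PySem.Str.split? s " ").getD []).map String.toList)

-- ===== PRECONDITION & SPEC =====
def Spec_printVertically (s : String) (out : List String) : Prop := out = printVertically_alt s
instance (s : String) (out : List String) : Decidable (Spec_printVertically s out) := by unfold Spec_printVertically; infer_instance

-- ===== CLAIM (what is proved, stated in full; the proofs are below) =====
def Claim_equal_printVertically : Prop := ∀ (s : String), Dom_printVertically s → Spec_printVertically s (printVertically s)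

-- ===== LEMMAS AND PROOFS =====

theorem pvMaxLen_map_drop (ws : List (List Char)) :
    pvMaxLen (ws.map (List.drop 1)) = pvMaxLen ws - 1 := by
  induction ws with
  | nil => rfl
  | cons w t ih => simp only [List.map_cons, pvMaxLen, ih, List.length_drop]; omega

theorem pvAny_iff (ws : List (List Char)) :
    ws.any (fun w => !w.isEmpty) = true ↔ pvMaxLen ws ≠ 0 := by
  induction ws with
  | nil => simp [pvMaxLen]
  | cons w t ih =>
    simp only [List.any_cons, Bool.or_eq_true, ih, Bool.not_eq_eq_eq_not, Bool.not_true,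
      List.isEmpty_eq_false_iff, pvMaxLen, ← List.length_pos_iff]
    omega


-- the common normal form of both programs: row k holds the k-th character of each word (padded
-- with ' '), rstripped
def pvRow (ws : List (List Char)) (k : Nat) : String :=
  PySem.Str.rstrip (String.ofList (ws.map (fun w => w.getD k ' ')))

-- ---- B side: the while-any loop produces rows 0 .. pvMaxLen - 1 ----
theorem pvHeadD_eq_getD (w : List Char) : w.headD ' ' = w.getD 0 ' ' := by
  cases w <;> simp [List.getD]

theorem pvAltGo_eq (n : Nat) : ∀ ws : List (List Char), pvMaxLen ws = n →
    pvAltGo n ws = (List.range n).map (pvRow ws) := by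
  induction n with
  | zero => intro ws _; simp [pvAltGo]
  | succ n ih =>
    intro ws h
    rw [pvAltGo]
    have hany : ws.any (fun w => !w.isEmpty) = true := by rw [pvAny_iff]; omega
    rw [if_pos hany, ih (ws.map (List.drop 1)) (by rw [pvMaxLen_map_drop, h]; omega),
      List.range_succ_eq_map, List.map_cons, List.map_map]
    refine congrArg₂ List.cons ?_ ?_
    · simp only [pvRow]
      congr 2
      exact List.map_congr_left (fun w _ => pvHeadD_eq_getD w)
    · apply List.map_congr_left
      intro k _
      simp only [Function.comp, pvRow, List.map_map, Nat.succ_eq_add_one]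
      congr 2
      exact List.map_congr_left (fun w _ => by cases w <;> simp [List.getD])

theorem pvAlt_normal (s : String) :
    printVertically_alt s
      = (List.range (pvMaxLen (((PySem.Str.split? s " ").getD []).map String.toList))).map
          (pvRow (((PySem.Str.split? s " ").getD []).map String.toList)) :=
  pvAltGo_eq _ _ rfl

-- ---- A side: the index-driven grid fill produces the same rows ----
theorem pvFoldl_len_int (words : List String) : ∀ a : Nat,
    words.foldl (fun acc w => max acc (PySem.Str.len w)) ((a : Nat) : Int)
      = (((words.map String.toList).foldl (fun acc w => max acc w.length) a : Nat) : Int) := by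
  induction words with
  | nil => intro a; simp
  | cons w t ih =>
    intro a
    rw [List.foldl_cons, List.map_cons, List.foldl_cons, PySem.Str.len_eq w, ← Nat.cast_max]
    exact ih (max a w.toList.length)

theorem pvFoldl_maxLen (ws : List (List Char)) : ∀ a : Nat,
    ws.foldl (fun acc w => max acc w.length) a = max a (pvMaxLen ws) := by
  induction ws with
  | nil => intro a; simp [pvMaxLen]
  | cons w t ih => intro a; simp [List.foldl_cons, ih, pvMaxLen, Nat.max_assoc]

theorem map_pyRange_getD {α β : Type} (xs : List α) (d : α) (F : α → β) :
    (PySem.List.pyRange 0 (xs.length : Int)).map (fun j => F (PySem.List.pyGetD xs j d)) = xs.map F := by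
  rw [PySem.List.pyRange_one, List.map_map]
  apply List.ext_getElem
  · simp
  · intro i h1 h2
    simp only [List.getElem_map, List.getElem_range, Function.comp_apply, Int.zero_add]
    rw [PySem.List.pyGetD_natCast, List.getD_eq_getElem?_getD,
      List.getElem?_eq_getElem (by simpa using h2)]
    rfl

theorem pvCell_eq' (w : String) (k : Nat) :
    (if k < w.length then w.toList[k]?.getD ' ' else ' ') = w.toList.getD k ' ' := by
  rw [List.getD_eq_getElem?_getD]
  by_cases h : k < w.toList.length
  · rw [if_pos (by rwa [← String.length_toList])]
  · rw [if_neg (by rwa [← String.length_toList]), List.getElem?_eq_none (by omega)]; rfl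

theorem pvA_normal (s : String) :
    printVertically s
      = (List.range (pvMaxLen (((PySem.Str.split? s " ").getD []).map String.toList))).map
          (pvRow (((PySem.Str.split? s " ").getD []).map String.toList)) := by
  simp only [printVertically]
  rw [PySem.List.foldl_pyRange_zero_pyGetD ((PySem.Str.split? s " ").getD []) ""
    (fun acc w => max acc (PySem.Str.len w)) 0]
  simp only [PySem.List.foldl_append_singleton_eq_map, List.nil_append]
  have hl := pvFoldl_len_int ((PySem.Str.split? s " ").getD []) 0
  rw [Nat.cast_zero] at hl
  rw [hl, pvFoldl_maxLen, Nat.zero_max]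
  rw [PySem.List.pyRange_one 0 ((pvMaxLen (((PySem.Str.split? s " ").getD []).map String.toList) : Nat) : Int)]
  norm_num
  intro k _
  rw [map_pyRange_getD ((PySem.Str.split? s " ").getD []) ""
      (fun w => if k < w.length then w.toList[k]?.getD ' ' else ' ')]
  simp only [pvRow, List.map_map]
  congr 2
  exact List.map_congr_left (fun w _ => by simp [Function.comp, pvCell_eq'])

-- ===== VERDICT (by name: the statement is the Claim_ definition above) =====
theorem printVertically_spec : Claim_equal_printVertically := by
  intro s _
  unfold Spec_printVertically
  rw [pvA_normal, pvAlt_normal]
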